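-- pv_equiv track=rewrite | github.com/mariolim96/algoritmi | iterative to recursive/2022-02.py | algo
-- ===== SOURCE A (Python) =====
-- def S(A: list, l: int, r: int):
--     idx = (l-r+1)
--     return A[idx]
--
-- def algo(A, l, r):
--     s = r-l+1
--     if s <= 3:
--         return S(A, l, r)
--     else:
--         k = s//3
--         z = algo(A, l, r-k)
--         z = z+algo(A, l+k, r)
--         h = s//2
--         z = z+algo(A, l+h, r-h)
--         return z
-- ===== SOURCE B (Python) =====
-- def algo(A, l, r):
--     # A's value depends on (l, r) only through s = r-l+1: the base case reads
--     # A[l-r+1] = A[2-s], and all three recursive calls preserve this shape: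
--     # two of size s - s//3 and one of size s % 2.  So iterate on s directly:
--     # f(s) = 2*f(s - s//3) + A[2 - s%2] for s > 3, f(s) = A[2-s] otherwise.
--     s = r - l + 1
--     total = 0
--     mult = 1
--     while s > 3:
--         total += mult * A[2 - (s % 2)]
--         mult *= 2
--         s -= s // 3
--     return total + mult * A[2 - s]
-- ===== Notes on version B (the rewrite author's own statement) =====
-- stated objective: alternative
-- what changed: A's result depends on (l,r) only through the size s=r-l+1 (base case reads A[2-s], all three recursive calls shrink s the same way), so B replaces the triple recursion with a single while-loop on s accumulating a running total and a power-of-two multiplier.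
import Mathlib
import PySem

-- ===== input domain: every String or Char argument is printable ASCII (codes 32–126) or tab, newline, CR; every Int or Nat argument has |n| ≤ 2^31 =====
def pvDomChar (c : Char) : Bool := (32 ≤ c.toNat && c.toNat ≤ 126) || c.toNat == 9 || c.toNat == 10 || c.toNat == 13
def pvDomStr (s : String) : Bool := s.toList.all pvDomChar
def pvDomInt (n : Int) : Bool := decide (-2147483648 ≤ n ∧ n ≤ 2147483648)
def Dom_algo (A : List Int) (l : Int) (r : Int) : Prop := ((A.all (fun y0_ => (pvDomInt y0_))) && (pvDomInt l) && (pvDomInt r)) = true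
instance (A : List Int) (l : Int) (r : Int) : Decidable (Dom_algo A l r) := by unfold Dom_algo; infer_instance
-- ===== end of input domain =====

-- B replaces A's triple recursion on (l, r) by a single loop on the size s = r-l+1
-- (A's value depends only on s): a different algorithm, same result.

-- ===== PORT A =====
def algo (A : List Int) (l : Int) (r : Int) : Int :=
  if r - l + 1 ≤ 3 then
    PySem.List.pyGetD A (l - r + 1) 0
  else
    algo A l (r - PySem.Int.floordiv (r - l + 1) 3)
    + algo A (l + PySem.Int.floordiv (r - l + 1) 3) r
    + algo A (l + PySem.Int.floordiv (r - l + 1) 2) (r - PySem.Int.floordiv (r - l + 1) 2)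
termination_by (r - l + 1).toNat
decreasing_by
  · have h3 : PySem.Int.floordiv (r - l + 1) 3 = (r - l + 1) / 3 :=
      PySem.Int.floordiv_eq_ediv_of_pos (by omega)
    omega
  · have h3 : PySem.Int.floordiv (r - l + 1) 3 = (r - l + 1) / 3 :=
      PySem.Int.floordiv_eq_ediv_of_pos (by omega)
    omega
  · have h2 : PySem.Int.floordiv (r - l + 1) 2 = (r - l + 1) / 2 :=
      PySem.Int.floordiv_eq_ediv_of_pos (by omega)
    omega

-- ===== PORT B =====
-- the while-loop of Source B, state (s, total, mult)
def algoGo (A : List Int) (s : Int) (total : Int) (mult : Int) : Int :=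
  if s > 3 then
    algoGo A (s - PySem.Int.floordiv s 3)
      (total + mult * PySem.List.pyGetD A (2 - PySem.Int.mod s 2) 0) (mult * 2)
  else
    total + mult * PySem.List.pyGetD A (2 - s) 0
termination_by s.toNat
decreasing_by
  have h3 : PySem.Int.floordiv s 3 = s / 3 := PySem.Int.floordiv_eq_ediv_of_pos (by omega)
  omega

def algo_alt (A : List Int) (l : Int) (r : Int) : Int :=
  algoGo A (r - l + 1) 0 1

-- ===== PRECONDITION & SPEC =====
-- Pre_ excludes exactly the inputs where Python A raises IndexError: for size
-- s = r-l+1 > 3 every base case reads A[1], A[2] or A[-1] (so len ≥ 3 suffices and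
-- is needed), for s ≤ 3 the single read A[2-s] must be in range.
def Pre_algo (A : List Int) (l : Int) (r : Int) : Prop :=
  (3 < r - l + 1 ∧ 3 ≤ (A.length : Int)) ∨
  (r - l + 1 ≤ 3 ∧ PySem.Raise.InRange A.length (2 - (r - l + 1)))
instance (A : List Int) (l : Int) (r : Int) : Decidable (Pre_algo A l r) := by
  unfold Pre_algo; infer_instance
def pvWitness_algo : List Int × Int × Int := ([1, 2, 3, 4, 5], 0, 4)

def Spec_algo (A : List Int) (l : Int) (r : Int) (out : Int) : Prop := out = algo_alt A l r
instance (A : List Int) (l : Int) (r : Int) (out : Int) : Decidable (Spec_algo A l r out) := by unfold Spec_algo; infer_instance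

-- ===== CLAIM (what is proved, stated in full; the proofs are below) =====
def Claim_equal_algo : Prop := ∀ (A : List Int) (l : Int) (r : Int), Dom_algo A l r → Pre_algo A l r → Spec_algo A l r (algo A l r)

-- ===== LEMMAS AND PROOFS =====

-- A's value as a function of the size s alone
def Gfun (A : List Int) (s : Int) : Int :=
  if s ≤ 3 then
    PySem.List.pyGetD A (2 - s) 0
  else
    2 * Gfun A (s - PySem.Int.floordiv s 3) + Gfun A (PySem.Int.mod s 2)
termination_by s.toNat
decreasing_by
  · have h3 : PySem.Int.floordiv s 3 = s / 3 := PySem.Int.floordiv_eq_ediv_of_pos (by omega)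
    omega
  · have h2 : PySem.Int.mod s 2 = s % 2 := PySem.Int.mod_eq_emod_of_pos (by omega)
    omega

theorem algo_eq_G (A : List Int) :
    ∀ (n : Nat) (l r : Int), (r - l + 1).toNat ≤ n → algo A l r = Gfun A (r - l + 1) := by
  intro n
  induction n with
  | zero =>
    intro l r h
    rw [algo, Gfun]
    simp only [if_pos (by omega : r - l + 1 ≤ 3)]
    congr 1; omega
  | succ n ih =>
    intro l r h
    by_cases hs : r - l + 1 ≤ 3
    · rw [algo, Gfun]
      simp only [if_pos hs]
      congr 1; omega
    · have h3 : PySem.Int.floordiv (r - l + 1) 3 = (r - l + 1) / 3 :=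
        PySem.Int.floordiv_eq_ediv_of_pos (by omega)
      have h2 : PySem.Int.floordiv (r - l + 1) 2 = (r - l + 1) / 2 :=
        PySem.Int.floordiv_eq_ediv_of_pos (by omega)
      have hm2 : PySem.Int.mod (r - l + 1) 2 = (r - l + 1) % 2 :=
        PySem.Int.mod_eq_emod_of_pos (by omega)
      rw [algo, Gfun]
      simp only [if_neg hs]
      have e1 : algo A l (r - PySem.Int.floordiv (r - l + 1) 3)
          = Gfun A (r - l + 1 - PySem.Int.floordiv (r - l + 1) 3) := by
        rw [ih _ _ (by omega)]; congr 1; omega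
      have e2 : algo A (l + PySem.Int.floordiv (r - l + 1) 3) r
          = Gfun A (r - l + 1 - PySem.Int.floordiv (r - l + 1) 3) := by
        rw [ih _ _ (by omega)]; congr 1; omega
      have e3 : algo A (l + PySem.Int.floordiv (r - l + 1) 2)
            (r - PySem.Int.floordiv (r - l + 1) 2)
          = Gfun A (PySem.Int.mod (r - l + 1) 2) := by
        rw [ih _ _ (by omega)]; congr 1; omega
      rw [e1, e2, e3]; ring

theorem go_eq_G (A : List Int) :
    ∀ (n : Nat) (s total mult : Int), s.toNat ≤ n →
      algoGo A s total mult = total + mult * Gfun A s := by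
  intro n
  induction n with
  | zero =>
    intro s total mult h
    rw [algoGo, Gfun]
    simp only [if_neg (by omega : ¬ s > 3), if_pos (by omega : s ≤ 3)]
  | succ n ih =>
    intro s total mult h
    by_cases hs : s > 3
    · have h3 : PySem.Int.floordiv s 3 = s / 3 := PySem.Int.floordiv_eq_ediv_of_pos (by omega)
      have hm2 : PySem.Int.mod s 2 = s % 2 := PySem.Int.mod_eq_emod_of_pos (by omega)
      rw [algoGo, Gfun]
      simp only [if_pos hs, if_neg (by omega : ¬ s ≤ 3)]
      rw [ih _ _ _ (by omega)]
      have hbase : Gfun A (PySem.Int.mod s 2) = PySem.List.pyGetD A (2 - PySem.Int.mod s 2) 0 := by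
        rw [Gfun]
        simp only [if_pos (by omega : PySem.Int.mod s 2 ≤ 3)]
      rw [hbase]; ring
    · rw [algoGo, Gfun]
      simp only [if_neg hs, if_pos (by omega : s ≤ 3)]

-- ===== VERDICT (by name: the statement is the Claim_ definition above) =====
theorem algo_spec : Claim_equal_algo := by
  intro A l r _ _
  unfold Spec_algo algo_alt
  rw [algo_eq_G A (r - l + 1).toNat l r le_rfl,
      go_eq_G A (r - l + 1).toNat (r - l + 1) 0 1 le_rfl]
  ring
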